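-- pv_equiv track=rewrite | github.com/mahnoorfatima997/macad-thesis-25 | thesis-agents/agents/domain_expert.py | _extract_topic_from_user_input
-- ===== SOURCE A (Python) =====
-- def _extract_topic_from_user_input(user_input: str) -> str:
--     """Extract the main architectural topic from user input"""
--
--     # Common architectural topics
--     topic_keywords = {
--         "flexible spaces": ["flexible", "flexibility", "adaptable", "multi-use"],
--         "lighting": ["light", "lighting", "daylight", "illumination"],
--         "circulation": ["circulation", "flow", "movement", "path"],
--         "accessibility": ["access", "accessible", "universal design"],
--         "sustainability": ["sustainable", "green", "environmental", "eco"],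
--         "materials": ["material", "finish", "texture", "surface"],
--         "structure": ["structure", "structural", "support", "frame"],
--         "acoustics": ["acoustic", "sound", "noise", "audio"],
--         "ventilation": ["ventilation", "air", "breathing", "fresh air"],
--         "shading": ["shade", "shading", "sun protection", "overhang"],
--         "community spaces": ["community", "social", "gathering", "public"],
--         "office design": ["office", "workplace", "work", "desk"],
--         "open plan": ["open plan", "open space", "open office"],
--         #3107 ADDED MORE
--         "private spaces": ["private", "quiet", "focus", "individual"],
--         "adaptive reuse": ["adaptive reuse", "adaptive", "reuse", "renovation", "retrofit", "conversion", "repurposing"],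
--         "energy efficiency": ["energy", "efficient", "efficiency", "thermal", "insulation"],
--         "natural ventilation": ["natural ventilation", "cross ventilation", "passive cooling"],
--         "daylighting": ["daylighting", "daylight", "natural light", "sunlight"],
--         "passive design": ["passive", "passive design", "passive solar"],
--         "biophilic design": ["biophilic", "nature", "natural elements", "green walls"],
--         "universal design": ["universal design", "inclusive design", "accessibility"],
--         "modular design": ["modular", "modular design", "prefabricated", "prefab"],
--         "smart building": ["smart", "intelligent", "automation", "technology"],
--         "historic preservation": ["historic", "preservation", "heritage", "conservation"],
--         "urban design": ["urban", "city", "street", "public space"],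
--         "landscape architecture": ["landscape", "garden", "outdoor", "green space"],
--         "interior design": ["interior", "furniture", "furnishings", "spatial design"],
--         "parametric design": ["parametric", "algorithmic", "computational", "digital fabrication"],
--         "prefabrication": ["prefabrication", "prefab", "modular construction", "off-site"],
--         "mass timber": ["mass timber", "cross laminated timber", "clt", "wood construction"],
--         "net zero": ["net zero", "zero energy", "carbon neutral", "sustainable"],
--         "green building": ["green building", "leed", "sustainable building", "eco-friendly"]
--     }
--
--     user_input_lower = user_input.lower()
--
--     # Find the most specific topic match (prioritize longer/more specific terms first)
--     # Sort topics by specificity (longer topic names first)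
--     sorted_topics = sorted(topic_keywords.items(), key=lambda x: len(x[0]), reverse=True)
--
--     # Check all topics for matches
--     for topic, keywords in sorted_topics:
--         if any(keyword in user_input_lower for keyword in keywords):
--             return topic
--
--     # If no specific topic found, extract from user input
--     words = user_input_lower.split()
--     # Look for architectural terms
--     architectural_terms = ["space", "design", "building", "room", "area", "zone", "layout"]
--     for word in words:
--         if word in architectural_terms:
--             return f"{word} design"
--
--     # Default to the gap_type if nothing specific found
--     return user_input_lower.replace(" ", "_")
-- ===== SOURCE B (Python) =====
-- def _extract_topic_from_user_input(user_input: str) -> str: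
--     """Extract the main architectural topic from user input (flat keyword table + max)."""
--     s = user_input.lower()
--     matches = [topic for kw, topic in _KEYWORD_TOPIC if kw in s]
--     if matches:
--         # max with key=len returns the FIRST maximal element, i.e. the earliest
--         # topic (in table order) with the longest name -- A's stable sort + first match.
--         return max(matches, key=len)
--     hit = next((w for w in s.split()
--                 if w in ["space", "design", "building", "room", "area", "zone", "layout"]), None)
--     if hit is not None:
--         return f"{hit} design"
--     return s.replace(" ", "_")
--
--
-- # The topic table of A, flattened to (keyword, topic) pairs in the dict's order.
-- _KEYWORD_TOPIC = [
--     ('flexible', 'flexible spaces'),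
--     ('flexibility', 'flexible spaces'),
--     ('adaptable', 'flexible spaces'),
--     ('multi-use', 'flexible spaces'),
--     ('light', 'lighting'),
--     ('lighting', 'lighting'),
--     ('daylight', 'lighting'),
--     ('illumination', 'lighting'),
--     ('circulation', 'circulation'),
--     ('flow', 'circulation'),
--     ('movement', 'circulation'),
--     ('path', 'circulation'),
--     ('access', 'accessibility'),
--     ('accessible', 'accessibility'),
--     ('universal design', 'accessibility'),
--     ('sustainable', 'sustainability'),
--     ('green', 'sustainability'),
--     ('environmental', 'sustainability'),
--     ('eco', 'sustainability'),
--     ('material', 'materials'),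
--     ('finish', 'materials'),
--     ('texture', 'materials'),
--     ('surface', 'materials'),
--     ('structure', 'structure'),
--     ('structural', 'structure'),
--     ('support', 'structure'),
--     ('frame', 'structure'),
--     ('acoustic', 'acoustics'),
--     ('sound', 'acoustics'),
--     ('noise', 'acoustics'),
--     ('audio', 'acoustics'),
--     ('ventilation', 'ventilation'),
--     ('air', 'ventilation'),
--     ('breathing', 'ventilation'),
--     ('fresh air', 'ventilation'),
--     ('shade', 'shading'),
--     ('shading', 'shading'),
--     ('sun protection', 'shading'),
--     ('overhang', 'shading'),
--     ('community', 'community spaces'),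
--     ('social', 'community spaces'),
--     ('gathering', 'community spaces'),
--     ('public', 'community spaces'),
--     ('office', 'office design'),
--     ('workplace', 'office design'),
--     ('work', 'office design'),
--     ('desk', 'office design'),
--     ('open plan', 'open plan'),
--     ('open space', 'open plan'),
--     ('open office', 'open plan'),
--     ('private', 'private spaces'),
--     ('quiet', 'private spaces'),
--     ('focus', 'private spaces'),
--     ('individual', 'private spaces'),
--     ('adaptive reuse', 'adaptive reuse'),
--     ('adaptive', 'adaptive reuse'),
--     ('reuse', 'adaptive reuse'),
--     ('renovation', 'adaptive reuse'),
--     ('retrofit', 'adaptive reuse'),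
--     ('conversion', 'adaptive reuse'),
--     ('repurposing', 'adaptive reuse'),
--     ('energy', 'energy efficiency'),
--     ('efficient', 'energy efficiency'),
--     ('efficiency', 'energy efficiency'),
--     ('thermal', 'energy efficiency'),
--     ('insulation', 'energy efficiency'),
--     ('natural ventilation', 'natural ventilation'),
--     ('cross ventilation', 'natural ventilation'),
--     ('passive cooling', 'natural ventilation'),
--     ('daylighting', 'daylighting'),
--     ('daylight', 'daylighting'),
--     ('natural light', 'daylighting'),
--     ('sunlight', 'daylighting'),
--     ('passive', 'passive design'),
--     ('passive design', 'passive design'),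
--     ('passive solar', 'passive design'),
--     ('biophilic', 'biophilic design'),
--     ('nature', 'biophilic design'),
--     ('natural elements', 'biophilic design'),
--     ('green walls', 'biophilic design'),
--     ('universal design', 'universal design'),
--     ('inclusive design', 'universal design'),
--     ('accessibility', 'universal design'),
--     ('modular', 'modular design'),
--     ('modular design', 'modular design'),
--     ('prefabricated', 'modular design'),
--     ('prefab', 'modular design'),
--     ('smart', 'smart building'),
--     ('intelligent', 'smart building'),
--     ('automation', 'smart building'),
--     ('technology', 'smart building'),
--     ('historic', 'historic preservation'),
--     ('preservation', 'historic preservation'),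
--     ('heritage', 'historic preservation'),
--     ('conservation', 'historic preservation'),
--     ('urban', 'urban design'),
--     ('city', 'urban design'),
--     ('street', 'urban design'),
--     ('public space', 'urban design'),
--     ('landscape', 'landscape architecture'),
--     ('garden', 'landscape architecture'),
--     ('outdoor', 'landscape architecture'),
--     ('green space', 'landscape architecture'),
--     ('interior', 'interior design'),
--     ('furniture', 'interior design'),
--     ('furnishings', 'interior design'),
--     ('spatial design', 'interior design'),
--     ('parametric', 'parametric design'),
--     ('algorithmic', 'parametric design'),
--     ('computational', 'parametric design'),
--     ('digital fabrication', 'parametric design'),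
--     ('prefabrication', 'prefabrication'),
--     ('prefab', 'prefabrication'),
--     ('modular construction', 'prefabrication'),
--     ('off-site', 'prefabrication'),
--     ('mass timber', 'mass timber'),
--     ('cross laminated timber', 'mass timber'),
--     ('clt', 'mass timber'),
--     ('wood construction', 'mass timber'),
--     ('net zero', 'net zero'),
--     ('zero energy', 'net zero'),
--     ('carbon neutral', 'net zero'),
--     ('sustainable', 'net zero'),
--     ('green building', 'green building'),
--     ('leed', 'green building'),
--     ('sustainable building', 'green building'),
--     ('eco-friendly', 'green building'),
-- ]
-- ===== Notes on version B (the rewrite author's own statement) =====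
-- stated objective: alternative
-- what changed: B replaces A's sort of the topic table by name length followed by a first-match scan with a flat (keyword, topic) pair table scanned once by a comprehension and Python's max(matches, key=len), whose first-maximal rule reproduces the stable descending sort's tie-break; the word-scan fallback is rewritten with next() over a generator and the replace default is unchanged.
import Mathlib
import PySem

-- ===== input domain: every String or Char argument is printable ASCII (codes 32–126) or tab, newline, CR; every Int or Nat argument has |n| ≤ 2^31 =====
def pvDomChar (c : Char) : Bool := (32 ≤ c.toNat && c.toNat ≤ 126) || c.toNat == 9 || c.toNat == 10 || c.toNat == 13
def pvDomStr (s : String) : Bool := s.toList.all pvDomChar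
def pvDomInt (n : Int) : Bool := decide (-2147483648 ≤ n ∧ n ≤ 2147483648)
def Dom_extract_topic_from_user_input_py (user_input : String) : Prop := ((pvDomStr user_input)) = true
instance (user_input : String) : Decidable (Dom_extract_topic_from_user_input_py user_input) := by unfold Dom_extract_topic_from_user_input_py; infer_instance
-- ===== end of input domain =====

-- B replaces A's build-and-sort-then-first-match by a flat (keyword, topic) pair table
-- scanned once (a comprehension) followed by Python max(key=len), whose first-maximal rule
-- reproduces the stable descending sort's tie-break.  Objective: alternative (no sort).

-- ===== PORT A =====
def pvTopics : List (String × List String) := [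
  ("flexible spaces", ["flexible", "flexibility", "adaptable", "multi-use"]),
  ("lighting", ["light", "lighting", "daylight", "illumination"]),
  ("circulation", ["circulation", "flow", "movement", "path"]),
  ("accessibility", ["access", "accessible", "universal design"]),
  ("sustainability", ["sustainable", "green", "environmental", "eco"]),
  ("materials", ["material", "finish", "texture", "surface"]),
  ("structure", ["structure", "structural", "support", "frame"]),
  ("acoustics", ["acoustic", "sound", "noise", "audio"]),
  ("ventilation", ["ventilation", "air", "breathing", "fresh air"]),
  ("shading", ["shade", "shading", "sun protection", "overhang"]),
  ("community spaces", ["community", "social", "gathering", "public"]),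
  ("office design", ["office", "workplace", "work", "desk"]),
  ("open plan", ["open plan", "open space", "open office"]),
  ("private spaces", ["private", "quiet", "focus", "individual"]),
  ("adaptive reuse", ["adaptive reuse", "adaptive", "reuse", "renovation", "retrofit", "conversion", "repurposing"]),
  ("energy efficiency", ["energy", "efficient", "efficiency", "thermal", "insulation"]),
  ("natural ventilation", ["natural ventilation", "cross ventilation", "passive cooling"]),
  ("daylighting", ["daylighting", "daylight", "natural light", "sunlight"]),
  ("passive design", ["passive", "passive design", "passive solar"]),
  ("biophilic design", ["biophilic", "nature", "natural elements", "green walls"]),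
  ("universal design", ["universal design", "inclusive design", "accessibility"]),
  ("modular design", ["modular", "modular design", "prefabricated", "prefab"]),
  ("smart building", ["smart", "intelligent", "automation", "technology"]),
  ("historic preservation", ["historic", "preservation", "heritage", "conservation"]),
  ("urban design", ["urban", "city", "street", "public space"]),
  ("landscape architecture", ["landscape", "garden", "outdoor", "green space"]),
  ("interior design", ["interior", "furniture", "furnishings", "spatial design"]),
  ("parametric design", ["parametric", "algorithmic", "computational", "digital fabrication"]),
  ("prefabrication", ["prefabrication", "prefab", "modular construction", "off-site"]),
  ("mass timber", ["mass timber", "cross laminated timber", "clt", "wood construction"]),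
  ("net zero", ["net zero", "zero energy", "carbon neutral", "sustainable"]),
  ("green building", ["green building", "leed", "sustainable building", "eco-friendly"])]

def pvArchTerms : List String := ["space", "design", "building", "room", "area", "zone", "layout"]

-- 'for topic, keywords in sorted_topics: if any(keyword in user_input_lower ...): return topic'
def pvALoop (u : String) : List (String × List String) → Option String
  | [] => none
  | p :: rest =>
      if p.2.any (fun k => PySem.Str.isIn k u) then some p.1 else pvALoop u rest

-- 'for word in words: if word in architectural_terms: return f"{word} design"'
def pvAWordLoop : List String → Option String
  | [] => none
  | w :: ws => if pvArchTerms.contains w then some w else pvAWordLoop ws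

def extract_topic_from_user_input_py (user_input : String) : String :=
  let user_input_lower := PySem.Str.lower user_input
  let sorted_topics := PySem.List.sorted pvTopics (fun x => PySem.Str.len x.1) true
  match pvALoop user_input_lower sorted_topics with
  | some topic => topic
  | none =>
      match pvAWordLoop (PySem.Str.split₀ user_input_lower) with
      | some word => word ++ " design"
      | none => PySem.Str.replace user_input_lower " " "_"

-- ===== PORT B =====
-- Source B's flat (keyword, topic) table, in the same order
def pvPairs : List (String × String) := [
  ("flexible", "flexible spaces"),
  ("flexibility", "flexible spaces"),
  ("adaptable", "flexible spaces"),
  ("multi-use", "flexible spaces"),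
  ("light", "lighting"),
  ("lighting", "lighting"),
  ("daylight", "lighting"),
  ("illumination", "lighting"),
  ("circulation", "circulation"),
  ("flow", "circulation"),
  ("movement", "circulation"),
  ("path", "circulation"),
  ("access", "accessibility"),
  ("accessible", "accessibility"),
  ("universal design", "accessibility"),
  ("sustainable", "sustainability"),
  ("green", "sustainability"),
  ("environmental", "sustainability"),
  ("eco", "sustainability"),
  ("material", "materials"),
  ("finish", "materials"),
  ("texture", "materials"),
  ("surface", "materials"),
  ("structure", "structure"),
  ("structural", "structure"),
  ("support", "structure"),
  ("frame", "structure"),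
  ("acoustic", "acoustics"),
  ("sound", "acoustics"),
  ("noise", "acoustics"),
  ("audio", "acoustics"),
  ("ventilation", "ventilation"),
  ("air", "ventilation"),
  ("breathing", "ventilation"),
  ("fresh air", "ventilation"),
  ("shade", "shading"),
  ("shading", "shading"),
  ("sun protection", "shading"),
  ("overhang", "shading"),
  ("community", "community spaces"),
  ("social", "community spaces"),
  ("gathering", "community spaces"),
  ("public", "community spaces"),
  ("office", "office design"),
  ("workplace", "office design"),
  ("work", "office design"),
  ("desk", "office design"),
  ("open plan", "open plan"),
  ("open space", "open plan"),
  ("open office", "open plan"),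
  ("private", "private spaces"),
  ("quiet", "private spaces"),
  ("focus", "private spaces"),
  ("individual", "private spaces"),
  ("adaptive reuse", "adaptive reuse"),
  ("adaptive", "adaptive reuse"),
  ("reuse", "adaptive reuse"),
  ("renovation", "adaptive reuse"),
  ("retrofit", "adaptive reuse"),
  ("conversion", "adaptive reuse"),
  ("repurposing", "adaptive reuse"),
  ("energy", "energy efficiency"),
  ("efficient", "energy efficiency"),
  ("efficiency", "energy efficiency"),
  ("thermal", "energy efficiency"),
  ("insulation", "energy efficiency"),
  ("natural ventilation", "natural ventilation"),
  ("cross ventilation", "natural ventilation"),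
  ("passive cooling", "natural ventilation"),
  ("daylighting", "daylighting"),
  ("daylight", "daylighting"),
  ("natural light", "daylighting"),
  ("sunlight", "daylighting"),
  ("passive", "passive design"),
  ("passive design", "passive design"),
  ("passive solar", "passive design"),
  ("biophilic", "biophilic design"),
  ("nature", "biophilic design"),
  ("natural elements", "biophilic design"),
  ("green walls", "biophilic design"),
  ("universal design", "universal design"),
  ("inclusive design", "universal design"),
  ("accessibility", "universal design"),
  ("modular", "modular design"),
  ("modular design", "modular design"),
  ("prefabricated", "modular design"),
  ("prefab", "modular design"),
  ("smart", "smart building"),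
  ("intelligent", "smart building"),
  ("automation", "smart building"),
  ("technology", "smart building"),
  ("historic", "historic preservation"),
  ("preservation", "historic preservation"),
  ("heritage", "historic preservation"),
  ("conservation", "historic preservation"),
  ("urban", "urban design"),
  ("city", "urban design"),
  ("street", "urban design"),
  ("public space", "urban design"),
  ("landscape", "landscape architecture"),
  ("garden", "landscape architecture"),
  ("outdoor", "landscape architecture"),
  ("green space", "landscape architecture"),
  ("interior", "interior design"),
  ("furniture", "interior design"),
  ("furnishings", "interior design"),
  ("spatial design", "interior design"),
  ("parametric", "parametric design"),
  ("algorithmic", "parametric design"),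
  ("computational", "parametric design"),
  ("digital fabrication", "parametric design"),
  ("prefabrication", "prefabrication"),
  ("prefab", "prefabrication"),
  ("modular construction", "prefabrication"),
  ("off-site", "prefabrication"),
  ("mass timber", "mass timber"),
  ("cross laminated timber", "mass timber"),
  ("clt", "mass timber"),
  ("wood construction", "mass timber"),
  ("net zero", "net zero"),
  ("zero energy", "net zero"),
  ("carbon neutral", "net zero"),
  ("sustainable", "net zero"),
  ("green building", "green building"),
  ("leed", "green building"),
  ("sustainable building", "green building"),
  ("eco-friendly", "green building")]

def extract_topic_from_user_input_py_alt (user_input : String) : String :=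
  let s := PySem.Str.lower user_input
  -- 'matches = [topic for kw, topic in _KEYWORD_TOPIC if kw in s]'
  let ms := (pvPairs.filter (fun q => PySem.Str.isIn q.1 s)).map Prod.snd
  -- 'return max(matches, key=len) if matches else ...'
  match PySem.List.max? ms PySem.Str.len with
  | some t => t
  | none =>
      -- 'next((w for w in s.split() if w in [...]), None)'
      match (PySem.Str.split₀ s).find? (fun w =>
          (["space", "design", "building", "room", "area", "zone", "layout"] : List String).contains w) with
      | some w => w ++ " design"
      | none => PySem.Str.replace s " " "_"

-- ===== PRECONDITION & SPEC =====
def Spec_extract_topic_from_user_input_py (user_input : String) (out : String) : Prop := out = extract_topic_from_user_input_py_alt user_input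
instance (user_input : String) (out : String) : Decidable (Spec_extract_topic_from_user_input_py user_input out) := by unfold Spec_extract_topic_from_user_input_py; infer_instance

-- ===== CLAIM =====
def Claim_equal_extract_topic_from_user_input_py : Prop := ∀ (user_input : String), Dom_extract_topic_from_user_input_py user_input → Spec_extract_topic_from_user_input_py user_input (extract_topic_from_user_input_py user_input)

-- ===== LEMMAS AND PROOFS =====

-- A's per-topic match test and topic-name length key
def pvMatch (u : String) (p : String × List String) : Bool :=
  p.2.any (fun k => PySem.Str.isIn k u)

def pvKlen (p : String × List String) : Int := PySem.Str.len p.1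

-- the distinct topic-name lengths, descending: Python's stable descending sort of the
-- concrete table is the concatenation of the equal-length groups in table order
def pvKs : List Int := [22, 21, 19, 17, 16, 15, 14, 13, 12, 11, 9, 8, 7]

def pvGroups (l : List (String × List String)) : List (String × List String) :=
  pvKs.flatMap (fun n => l.filter (fun p => pvKlen p == n))

-- abstract one-pass accumulator used to connect the two sides
def pvBStep (u : String) (acc : Option String × Int) (p : String × List String) : Option String × Int :=
  if pvMatch u p && decide (pvKlen p > acc.2) then (some p.1, pvKlen p) else acc

-- the foldl step of PySem.List.max? at key PySem.Str.len
def pvMStep (acc : Option String) (x : String) : Option String :=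
  match acc with
  | none => some x
  | some m => if PySem.Str.len m < PySem.Str.len x then some x else some m

lemma pv_max?_eq (xs : List String) :
    PySem.List.max? xs PySem.Str.len = xs.foldl pvMStep none := by
  rw [PySem.List.max?]
  exact List.foldl_ext _ _ none (fun o x _ => by cases o <;> rfl)

lemma pv_sorted_eq :
    PySem.List.sorted pvTopics (fun x => PySem.Str.len x.1) true = pvGroups pvTopics := by
  decide

lemma pv_step'_match (u : String) (acc : Option String × Int) (p : String × List String)
    (h : pvMatch u p = true) :
    pvBStep u acc p = if pvKlen p > acc.2 then (some p.1, pvKlen p) else acc := by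
  simp [pvBStep, pvKlen, h]

-- the A-side loop is the first match, i.e. the head of the matching sublist
lemma pv_aloop_eq (u : String) (S : List (String × List String)) :
    pvALoop u S = ((S.filter (pvMatch u)).head?).map Prod.fst := by
  induction S with
  | nil => rfl
  | cons p rest ih =>
    have hc : (p.2.any fun k => PySem.Str.isIn k u) = pvMatch u p := rfl
    cases hb : pvMatch u p with
    | true =>
      simp only [pvALoop, hc, hb, if_true, List.filter_cons_of_pos hb,
        List.head?_cons, Option.map_some]
    | false =>
      have hneg : ¬ (pvMatch u p = true) := by rw [hb]; simp
      simp only [pvALoop, hc, hb, Bool.false_eq_true, if_false, ih,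
        List.filter_cons_of_neg hneg]

-- the accumulator fold skips non-matching entries
lemma pv_fold_filter (u : String) (l : List (String × List String)) (acc : Option String × Int) :
    l.foldl (pvBStep u) acc = (l.filter (pvMatch u)).foldl (pvBStep u) acc := by
  induction l generalizing acc with
  | nil => rfl
  | cons p rest ih =>
    by_cases h : pvMatch u p
    · simp [h, List.foldl, ih]
    · simp [h, List.foldl, pvBStep, ih]

-- once the accumulator holds a maximal length, the fold is constant
lemma pv_fold_const (u : String) (l : List (String × List String)) (acc : Option String × Int)
    (hle : ∀ p ∈ l, pvMatch u p = true → pvKlen p ≤ acc.2) :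
    l.foldl (pvBStep u) acc = acc := by
  induction l generalizing acc with
  | nil => rfl
  | cons p rest ih =>
    have hstep : pvBStep u acc p = acc := by
      by_cases h : pvMatch u p
      · rw [pv_step'_match u acc p h, if_neg (by simpa using hle p (by simp) h)]
      · simp [pvBStep, h]
    simp only [List.foldl, hstep]
    exact ih acc (fun q hq => hle q (by simp [hq]))

-- if some matching entry of length n exists and nothing exceeds n, the fold returns
-- the first such entry
lemma pv_fold_hits (u : String) (n : Int) (l : List (String × List String))
    (acc : Option String × Int) (hacc : acc.2 < n)
    (hle : ∀ p ∈ l, pvMatch u p = true → pvKlen p ≤ n)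
    (r : String × List String) (rs : List (String × List String))
    (hf : l.filter (fun p => pvMatch u p && (pvKlen p == n)) = r :: rs) :
    (l.foldl (pvBStep u) acc).1 = some r.1 := by
  induction l generalizing acc with
  | nil => simp at hf
  | cons p rest ih =>
    by_cases hm : pvMatch u p
    · by_cases hk : pvKlen p = n
      · have hr : p = r := by
          have : (p :: rest).filter (fun q => pvMatch u q && (pvKlen q == n)) =
              p :: rest.filter (fun q => pvMatch u q && (pvKlen q == n)) := by
            simp [hm, hk]
          rw [this] at hf; exact (List.cons_eq_cons.mp hf).1
        have hstep : pvBStep u acc p = (some p.1, pvKlen p) := by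
          rw [pv_step'_match u acc p hm, if_pos (by omega)]
        simp only [List.foldl, hstep]
        rw [pv_fold_const u rest (some p.1, pvKlen p)
          (fun q hq hmq => by simpa [hk] using hle q (by simp [hq]) hmq)]
        simp [hr]
      · have hlt : pvKlen p < n :=
          lt_of_le_of_ne (hle p (by simp) hm) hk
        have hf' : rest.filter (fun q => pvMatch u q && (pvKlen q == n)) = r :: rs := by
          simpa [hm, hk] using hf
        by_cases hup : pvKlen p > acc.2
        · have hstep : pvBStep u acc p = (some p.1, pvKlen p) := by
            rw [pv_step'_match u acc p hm, if_pos hup]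
          simp only [List.foldl, hstep]
          exact ih (some p.1, pvKlen p) (by simpa using hlt)
            (fun q hq => hle q (by simp [hq])) hf'
        · have hstep : pvBStep u acc p = acc := by
            rw [pv_step'_match u acc p hm, if_neg hup]
          simp only [List.foldl, hstep]
          exact ih acc hacc (fun q hq => hle q (by simp [hq])) hf'
    · have hf' : rest.filter (fun q => pvMatch u q && (pvKlen q == n)) = r :: rs := by
        simpa [hm] using hf
      have hstep : pvBStep u acc p = acc := by simp [pvBStep, hm]
      simp only [List.foldl, hstep]
      exact ih acc hacc (fun q hq => hle q (by simp [hq])) hf'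

lemma pv_klen_nonneg (p : String × List String) : 0 ≤ pvKlen p := by
  simp [pvKlen, PySem.Str.len_eq]

-- first match over the length-group concatenation = the one-pass best accumulator
lemma pv_main (u : String) (ks : List Int) (l : List (String × List String))
    (hp : ks.Pairwise (· > ·))
    (hmem : ∀ p ∈ l, pvMatch u p = true → pvKlen p ∈ ks) :
    (((ks.flatMap (fun n => l.filter (fun p => pvKlen p == n))).filter (pvMatch u)).head?).map
        Prod.fst = (l.foldl (pvBStep u) (none, -1)).1 := by
  induction ks generalizing l with
  | nil =>
    simp only [List.flatMap_nil, List.filter_nil, List.head?_nil, Option.map_none]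
    rw [pv_fold_filter]
    have : l.filter (pvMatch u) = [] := by
      rw [List.filter_eq_nil_iff]
      intro p hpl hm
      exact absurd (hmem p hpl hm) (by simp)
    rw [this]; rfl
  | cons n ks' ih =>
    have hgroup : ((l.filter (fun p => pvKlen p == n)).filter (pvMatch u)) =
        l.filter (fun p => pvMatch u p && (pvKlen p == n)) := by
      rw [List.filter_filter]
    rcases hg : l.filter (fun p => pvMatch u p && (pvKlen p == n)) with _ | ⟨r, rs⟩
    · have hmem' : ∀ p ∈ l, pvMatch u p = true → pvKlen p ∈ ks' := by
        intro p hpl hm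
        have := hmem p hpl hm
        rcases List.mem_cons.mp this with h | h
        · exfalso
          have : p ∈ l.filter (fun q => pvMatch u q && (pvKlen q == n)) := by
            simp [List.mem_filter, hpl, hm, h]
          rw [hg] at this; simp at this
        · exact h
      simpa [List.flatMap_cons, List.filter_append, hgroup, hg] using ih l (List.pairwise_cons.mp hp).2 hmem'
    · have hrl : r ∈ l ∧ (pvMatch u r && (pvKlen r == n)) = true := by
        have : r ∈ l.filter (fun q => pvMatch u q && (pvKlen q == n)) := by rw [hg]; simp
        exact List.mem_filter.mp this
      have hrn : pvKlen r = n := by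
        have := hrl.2; simp only [Bool.and_eq_true, beq_iff_eq] at this; exact this.2
      have hle : ∀ p ∈ l, pvMatch u p = true → pvKlen p ≤ n := by
        intro p hpl hm
        have := hmem p hpl hm
        rcases List.mem_cons.mp this with h | h
        · omega
        · have : ∀ x ∈ ks', n > x := (List.pairwise_cons.mp hp).1
          have := this _ h; omega
      have hacc : (-1 : Int) < n := by
        have := pv_klen_nonneg r; omega
      rw [List.flatMap_cons, List.filter_append, hgroup, hg]
      simp only [List.cons_append, List.head?_cons, Option.map_some]
      rw [pv_fold_hits u n l (none, -1) hacc hle r rs hg]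

lemma pv_klen_mem : ∀ p ∈ pvTopics, pvKlen p ∈ pvKs := by decide

lemma pv_ks_pairwise : pvKs.Pairwise (· > ·) := by decide

-- ===== bridging the accumulator fold with B's max? over the matched-topic list =====

def pvAbs : Option String → Option String × Int
  | none => (none, -1)
  | some t => (some t, PySem.Str.len t)

lemma pv_len_nonneg (s : String) : 0 ≤ PySem.Str.len s := by
  simp [PySem.Str.len_eq]

lemma pv_bridge (u : String) (l : List (String × List String)) (o : Option String) :
    l.foldl (pvBStep u) (pvAbs o) =
      pvAbs (((l.filter (pvMatch u)).map Prod.fst).foldl pvMStep o) := by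
  induction l generalizing o with
  | nil => rfl
  | cons p rest ih =>
    by_cases h : pvMatch u p
    · have hstep : pvBStep u (pvAbs o) p = pvAbs (pvMStep o p.1) := by
        cases o with
        | none =>
          have := pv_len_nonneg p.1
          simp [pvBStep, pvMStep, pvAbs, h, pvKlen]; omega
        | some t =>
          simp only [pvBStep, pvAbs, pvMStep, h, pvKlen, Bool.true_and]
          split_ifs with h1 h2 h2 <;> simp_all <;> omega
      simp only [List.foldl, hstep, List.filter_cons_of_pos h, List.map_cons]
      exact ih (pvMStep o p.1)
    · have hstep : pvBStep u (pvAbs o) p = pvAbs o := by simp [pvBStep, h]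
      simp only [List.foldl, hstep, List.filter_cons_of_neg (by simpa using h)]
      exact ih o

-- ===== collapsing B's duplicate topic occurrences =====

def pvContrib (u : String) (p : String × List String) : List String :=
  List.replicate ((p.2.filter (fun k => PySem.Str.isIn k u)).length) p.1

lemma pv_pairs_eq :
    pvPairs = pvTopics.flatMap (fun p => p.2.map (fun k => (k, p.1))) := by decide

lemma pv_matches_eq (u : String) :
    (pvPairs.filter (fun q => PySem.Str.isIn q.1 u)).map Prod.snd
      = pvTopics.flatMap (pvContrib u) := by
  rw [pv_pairs_eq, List.filter_flatMap, List.map_flatMap]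
  congr 1
  funext p
  simp [Function.comp_def, List.filter_map, List.map_map, pvContrib, List.map_const']

lemma pv_mstep_idem (o : Option String) (x : String) :
    pvMStep (pvMStep o x) x = pvMStep o x := by
  cases o with
  | none => simp [pvMStep]
  | some m =>
    have hm : pvMStep (some m) x
        = if PySem.Str.len m < PySem.Str.len x then some x else some m := rfl
    rw [hm]
    split_ifs with h
    · simp only [pvMStep]
      rw [if_neg (lt_irrefl _)]
    · simp only [pvMStep]
      rw [if_neg h]

lemma pv_foldl_replicate (o : Option String) (x : String) (n : Nat) :
    (List.replicate (n + 1) x).foldl pvMStep o = pvMStep o x := by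
  induction n generalizing o with
  | zero => rfl
  | succ k ih =>
    rw [List.replicate_succ, List.foldl_cons]
    rw [ih (pvMStep o x), pv_mstep_idem]

lemma pv_collapse (u : String) (l : List (String × List String)) (o : Option String) :
    (l.flatMap (pvContrib u)).foldl pvMStep o
      = ((l.filter (pvMatch u)).map Prod.fst).foldl pvMStep o := by
  induction l generalizing o with
  | nil => rfl
  | cons p rest ih =>
    rw [List.flatMap_cons, List.foldl_append]
    cases hb : pvMatch u p with
    | true =>
      have hne : (p.2.filter (fun k => PySem.Str.isIn k u)) ≠ [] := by
        rcases List.any_eq_true.mp hb with ⟨k, hk, hin⟩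
        exact List.ne_nil_of_mem (List.mem_filter.mpr ⟨hk, hin⟩)
      rcases Nat.exists_eq_succ_of_ne_zero
          (fun h0 => hne (List.eq_nil_of_length_eq_zero h0)) with ⟨m, hm⟩
      rw [List.filter_cons_of_pos hb, List.map_cons, List.foldl_cons]
      rw [pvContrib, hm, pv_foldl_replicate]
      exact ih (pvMStep o p.1)
    | false =>
      have hany : (p.2.any fun k => PySem.Str.isIn k u) = false := hb
      have h0 : (p.2.filter (fun k => PySem.Str.isIn k u)).length = 0 := by
        rw [List.length_eq_zero_iff, List.filter_eq_nil_iff]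
        intro k hk
        simpa using List.any_eq_false.mp hany k hk
      rw [pvContrib, h0, List.replicate_zero, List.foldl_nil,
        List.filter_cons_of_neg (by simp [hb])]
      exact ih o

-- A's word loop is find?
lemma pv_wordloop_eq (l : List String) :
    pvAWordLoop l = l.find? (fun w => pvArchTerms.contains w) := by
  induction l with
  | nil => rfl
  | cons w ws ih =>
    cases hb : pvArchTerms.contains w with
    | true =>
      simp only [pvAWordLoop, hb, if_true]
      rw [List.find?_cons_of_pos (by exact hb)]
    | false =>
      simp only [pvAWordLoop, hb, Bool.false_eq_true, if_false, ih]
      rw [List.find?_cons_of_neg (by simpa using hb)]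

-- ===== VERDICT =====
theorem extract_topic_from_user_input_py_spec : Claim_equal_extract_topic_from_user_input_py := by
  intro user_input _
  unfold Spec_extract_topic_from_user_input_py
  unfold extract_topic_from_user_input_py extract_topic_from_user_input_py_alt
  set u := PySem.Str.lower user_input with hu
  have key : pvALoop u (PySem.List.sorted pvTopics (fun x => PySem.Str.len x.1) true) =
      PySem.List.max? ((pvPairs.filter (fun q => PySem.Str.isIn q.1 u)).map Prod.snd)
        PySem.Str.len := by
    rw [pv_sorted_eq, pv_aloop_eq, pvGroups]
    rw [pv_main u pvKs pvTopics pv_ks_pairwise (fun p hp _ => pv_klen_mem p hp)]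
    rw [pv_max?_eq, pv_matches_eq, pv_collapse]
    have : (pvTopics.foldl (pvBStep u) (pvAbs none)).1 =
        (pvAbs (((pvTopics.filter (pvMatch u)).map Prod.fst).foldl pvMStep none)).1 := by
      rw [pv_bridge]
    simp only [pvAbs] at this
    rw [this]
    cases ((pvTopics.filter (pvMatch u)).map Prod.fst).foldl pvMStep none <;> rfl
  simp only [key, pv_wordloop_eq]
  rfl
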